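-- pv_equiv track=rewrite | github.com/pfiedorowicz/first-data-analysis | first_data_analysis.py | system_conversion
-- ===== SOURCE A (Python) =====
-- def system_conversion(number, system):
--     if number < 0:
--         symbol = -1
--     else:
--         symbol = 1
--     number = symbol*number
--     converted_number = 0
--     for i in range(len(str(number))):
--         converted_number += number % 10 * system**i
--         number = number//10
--     return converted_number*symbol
-- ===== SOURCE B (Python) =====
-- def system_conversion(number, system):
--     def reinterpret(n):
--         if n == 0:
--             return 0
--         return n % 10 + system * reinterpret(n // 10)
--     if number < 0:
--         return -reinterpret(-number)
--     return reinterpret(number)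
-- ===== Notes on version B (the rewrite author's own statement) =====
-- stated objective: simpler
-- what changed: B drops A's str()-based iteration count and power table entirely: a recursive helper reinterprets the decimal digits directly (n%10 + system*rec(n//10), base case n==0), with the sign handled by one branch at the top.
import Mathlib
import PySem

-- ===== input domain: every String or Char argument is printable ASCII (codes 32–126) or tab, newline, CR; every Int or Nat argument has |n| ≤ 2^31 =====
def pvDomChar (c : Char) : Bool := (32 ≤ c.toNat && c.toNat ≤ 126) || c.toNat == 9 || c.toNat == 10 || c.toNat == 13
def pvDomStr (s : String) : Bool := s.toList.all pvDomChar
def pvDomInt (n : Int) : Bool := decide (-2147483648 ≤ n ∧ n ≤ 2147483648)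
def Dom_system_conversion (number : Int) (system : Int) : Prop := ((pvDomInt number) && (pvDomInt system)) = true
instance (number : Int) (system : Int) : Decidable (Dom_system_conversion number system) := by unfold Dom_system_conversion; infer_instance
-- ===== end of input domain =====

-- B replaces A's str()-counted power-sum loop by a direct recursion on the decimal
-- digits (n%10 + system*rec(n//10)), sign handled once at the top (objective: simpler).
-- ===== PORT A =====
def system_conversion (number : Int) (system : Int) : Int :=
  let symbol : Int := if number < 0 then -1 else 1
  let n0 := symbol * number
  let st := (List.range (PySem.Int.toStr n0).toList.length).foldl
    (fun (st : Int × Int) (i : Nat) =>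
      (st.1 + PySem.Int.mod st.2 10 * system ^ i, PySem.Int.floordiv st.2 10))
    (0, n0)
  st.1 * symbol

-- ===== PORT B =====
-- B's inner 'reinterpret' is only ever called on a nonnegative int, so it is ported
-- with a Nat argument (n % 10, n // 10 on a nonnegative int are exactly Nat % and /).
def pvReinterpret (system : Int) (n : Nat) : Int :=
  if n = 0 then 0
  else ((n % 10 : Nat) : Int) + system * pvReinterpret system (n / 10)
termination_by n
decreasing_by exact Nat.div_lt_self (Nat.pos_of_ne_zero (by assumption)) (by norm_num)

def system_conversion_alt (number : Int) (system : Int) : Int :=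
  if number < 0 then -(pvReinterpret system (-number).toNat)
  else pvReinterpret system number.toNat

-- ===== PRECONDITION & SPEC =====
def Spec_system_conversion (number : Int) (system : Int) (out : Int) : Prop := out = system_conversion_alt number system
instance (number : Int) (system : Int) (out : Int) : Decidable (Spec_system_conversion number system out) := by unfold Spec_system_conversion; infer_instance

-- ===== CLAIM (what is proved, stated in full; the proofs are below) =====
def Claim_equal_system_conversion : Prop := ∀ (number : Int) (system : Int), Dom_system_conversion number system → Spec_system_conversion number system (system_conversion number system)

-- ===== LEMMAS AND PROOFS =====

-- helper notions used only by the proofs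
def pvShift : Nat → Int → Int
  | 0, n => n
  | k+1, n => PySem.Int.floordiv (pvShift k n) 10

def pvVal (s : Int) : Nat → Int → Int
  | 0, _ => 0
  | k+1, n => pvVal s k n + PySem.Int.mod (pvShift k n) 10 * s ^ k

-- number of decimal digits (in strong-induction form matching toDigitsCore)
def pvNumDigits (n : Nat) : Nat :=
  if n < 10 then 1 else pvNumDigits (n / 10) + 1
termination_by n
decreasing_by exact Nat.div_lt_self (by omega) (by norm_num)

theorem pvFoldA (s : Int) (k : Nat) (c n : Int) :
    (List.range k).foldl
      (fun (st : Int × Int) (i : Nat) =>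
        (st.1 + PySem.Int.mod st.2 10 * s ^ i, PySem.Int.floordiv st.2 10)) (c, n)
    = (c + pvVal s k n, pvShift k n) := by
  induction k with
  | zero => simp [pvVal, pvShift]
  | succ k ih => rw [List.range_succ, List.foldl_append, ih]; simp [pvVal, pvShift]; ring

theorem pvShift_succ' (k : Nat) (n : Int) :
    pvShift (k + 1) n = pvShift k (PySem.Int.floordiv n 10) := by
  induction k generalizing n with
  | zero => rfl
  | succ k ih => show PySem.Int.floordiv (pvShift (k+1) n) 10 = _; rw [ih]; rfl

theorem pvVal_succ (s : Int) (k : Nat) (n : Int) :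
    pvVal s (k + 1) n
      = PySem.Int.mod n 10 + s * pvVal s k (PySem.Int.floordiv n 10) := by
  induction k generalizing n with
  | zero => simp [pvVal, pvShift]
  | succ k ih =>
    show pvVal s (k+1) n + PySem.Int.mod (pvShift (k+1) n) 10 * s ^ (k+1) = _
    rw [ih, pvShift_succ']
    show _ = PySem.Int.mod n 10 + s * (pvVal s k _ + PySem.Int.mod (pvShift k _) 10 * s ^ k)
    ring

theorem pvVal_eq_reinterpret (s : Int) (k : Nat) (n : Nat) (h : n < 10 ^ k) :
    pvVal s k (n : Int) = pvReinterpret s n := by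
  induction k generalizing n with
  | zero =>
    interval_cases n
    rw [pvReinterpret]; simp [pvVal]
  | succ k ih =>
    rw [pvVal_succ, pvReinterpret]
    have hd : PySem.Int.floordiv (n : Int) 10 = ((n / 10 : Nat) : Int) := by
      exact_mod_cast PySem.Int.floordiv_natCast n 10
    have hm : PySem.Int.mod (n : Int) 10 = ((n % 10 : Nat) : Int) := by
      exact_mod_cast PySem.Int.mod_natCast n 10
    have hlt : n / 10 < 10 ^ k := by
      rw [pow_succ'] at h; exact Nat.div_lt_of_lt_mul h
    rw [hd, hm, ih _ hlt]
    by_cases h0 : n = 0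
    · subst h0
      have : pvReinterpret s 0 = 0 := by rw [pvReinterpret]; simp
      simp [this]
    · simp [h0]

-- length of Nat.toDigits 10 n is pvNumDigits n
theorem pvToDigitsCore_len (f n : Nat) (l : List Char) (hf : n < f) :
    (Nat.toDigitsCore 10 f n l).length = l.length + pvNumDigits n := by
  induction f generalizing n l with
  | zero => omega
  | succ f ih =>
    rw [Nat.toDigitsCore]
    by_cases h : n / 10 = 0
    · have : n < 10 := by omega
      rw [pvNumDigits]
      simp [h, this]
    · have h10 : 10 ≤ n := by
        by_contra hc
        exact h (Nat.div_eq_of_lt (by omega))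
      simp only [h, if_false]
      rw [ih (n / 10) _ (by omega), List.length_cons]
      conv_rhs => rw [pvNumDigits]
      rw [if_neg (by omega)]
      omega

theorem pvLt_pow_numDigits (n : Nat) : n < 10 ^ pvNumDigits n := by
  induction n using Nat.strong_induction_on with
  | _ n ih =>
    rw [pvNumDigits]
    by_cases h : n < 10
    · rw [if_pos h, pow_one]; exact h
    · simp only [h, if_false]
      have hrec := ih (n / 10) (Nat.div_lt_self (by omega) (by norm_num))
      rw [pow_succ]
      calc n < (n / 10 + 1) * 10 := by omega
        _ ≤ 10 ^ pvNumDigits (n / 10) * 10 := by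
            apply Nat.mul_le_mul_right; omega

theorem pvLen_toChars (n : Nat) :
    (PySem.Int.toStr (n : Int)).toList.length = pvNumDigits n := by
  rw [PySem.Int.toList_toStr]
  have : PySem.Int.toChars (n : Int) = Nat.toDigits 10 n := by
    simp [PySem.Int.toChars]
  rw [this, Nat.toDigits]
  simpa using pvToDigitsCore_len (n + 1) n [] (by omega)

theorem pvMain (s : Int) (n : Nat) :
    ((List.range (PySem.Int.toStr (n : Int)).toList.length).foldl
      (fun (st : Int × Int) (i : Nat) =>
        (st.1 + PySem.Int.mod st.2 10 * s ^ i, PySem.Int.floordiv st.2 10))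
      (0, (n : Int))).1
    = pvReinterpret s n := by
  rw [pvFoldA, pvLen_toChars]
  simp
  exact pvVal_eq_reinterpret s (pvNumDigits n) n (pvLt_pow_numDigits n)

-- ===== VERDICT (by name: the statement is the Claim_ definition above) =====
theorem system_conversion_spec : Claim_equal_system_conversion := by
  intro number system _
  unfold Spec_system_conversion system_conversion system_conversion_alt
  by_cases h : number < 0
  · have h1 : (-1 : Int) * number = (((-number).toNat : Nat) : Int) := by omega
    simp only [h, if_true]
    rw [h1, pvMain]
    ring
  · have h1 : (1 : Int) * number = ((number.toNat : Nat) : Int) := by omega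
    simp only [h, if_false]
    rw [h1, pvMain]
    ring
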